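-- pv_equiv track=rewrite | github.com/lmu-dbs/EC-Pred | src/contextppm/util/sequence_utils.py | _filter_start_end
-- ===== SOURCE A (Python) =====
-- def _filter_start_end(
--     sequence: list[int], start_activity: int, end_activity: int
-- ) -> list[int]:
--     try:
--         last_start_idx = (
--             len(sequence)
--             - 1
--             - [True if el == start_activity else False for el in sequence[::-1]].index(
--                 True
--             )
--         )
--     except ValueError:
--         last_start_idx = 0
--
--     try:
--         first_end_idx = [
--             True if el == end_activity else False for el in sequence
--         ].index(True)
--     except ValueError:
--         first_end_idx = len(sequence) - 1
--
--     filtered_sequence = sequence[last_start_idx : first_end_idx + 1]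
--
--     return filtered_sequence
-- ===== SOURCE B (Python) =====
-- def _filter_start_end(
--     sequence: list[int], start_activity: int, end_activity: int
-- ) -> list[int]:
--     last_start = None
--     first_end = None
--     for i, el in enumerate(sequence):
--         if el == start_activity:
--             last_start = i
--         if el == end_activity and first_end is None:
--             first_end = i
--     last_start_idx = last_start if last_start is not None else 0
--     first_end_idx = first_end if first_end is not None else len(sequence) - 1
--     return sequence[last_start_idx : first_end_idx + 1]
-- ===== Notes on version B (the rewrite author's own statement) =====
-- stated objective: simpler
-- what changed: Replaced A's two boolean-list comprehensions (one over the reversed list) with try/except around .index by a single forward enumerate loop that maintains the running last-start and first-end indices, then slices once.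
import Mathlib
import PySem

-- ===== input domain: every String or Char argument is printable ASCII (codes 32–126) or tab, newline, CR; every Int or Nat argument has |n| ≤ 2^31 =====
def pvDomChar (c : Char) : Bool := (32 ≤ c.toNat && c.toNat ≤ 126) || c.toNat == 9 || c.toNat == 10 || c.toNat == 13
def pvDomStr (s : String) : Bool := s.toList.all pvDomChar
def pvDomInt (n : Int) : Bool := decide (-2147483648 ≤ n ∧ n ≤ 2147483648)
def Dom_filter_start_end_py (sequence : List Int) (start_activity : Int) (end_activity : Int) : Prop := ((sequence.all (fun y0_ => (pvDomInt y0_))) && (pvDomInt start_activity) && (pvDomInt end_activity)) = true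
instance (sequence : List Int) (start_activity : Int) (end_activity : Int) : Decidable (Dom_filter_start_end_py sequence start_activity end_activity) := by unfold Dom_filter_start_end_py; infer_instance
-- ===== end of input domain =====

-- B replaces A's two scans (a reversed boolean list plus two .index calls) by one
-- forward loop maintaining the running last-start and first-end indices (objective: simpler).

-- ===== PORT A =====
def filter_start_end_py (sequence : List Int) (start_activity : Int) (end_activity : Int) : List Int :=
  -- sequence[::-1] is PySem.List.slice? with step -1 (never none for step = -1)
  let revSeq : List Int := (PySem.List.slice? sequence none none (-1)).getD []
  let last_start_idx : Int :=
    match PySem.List.index? (revSeq.map (fun el => if el = start_activity then true else false)) true with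
    | some i => (sequence.length : Int) - 1 - (i : Int)
    | none => 0
  let first_end_idx : Int :=
    match PySem.List.index? (sequence.map (fun el => if el = end_activity then true else false)) true with
    | some i => (i : Int)
    | none => (sequence.length : Int) - 1
  PySem.List.slice sequence (some last_start_idx) (some (first_end_idx + 1))

-- ===== PORT B =====
-- loop body of B's single for-loop over enumerate(sequence)
def pvStepB (start_activity end_activity : Int) (acc : Option Int × Option Int) (p : Int × Int) :
    Option Int × Option Int :=
  let acc1 := if p.2 = start_activity then (some p.1, acc.2) else acc
  if p.2 = end_activity ∧ acc1.2 = none then (acc1.1, some p.1) else acc1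

def filter_start_end_py_alt (sequence : List Int) (start_activity : Int) (end_activity : Int) : List Int :=
  let st := (PySem.List.enumerate sequence).foldl (pvStepB start_activity end_activity) (none, none)
  let last_start_idx : Int := st.1.getD 0
  let first_end_idx : Int := st.2.getD ((sequence.length : Int) - 1)
  PySem.List.slice sequence (some last_start_idx) (some (first_end_idx + 1))

-- ===== PRECONDITION & SPEC =====
def Spec_filter_start_end_py (sequence : List Int) (start_activity : Int) (end_activity : Int) (out : List Int) : Prop := out = filter_start_end_py_alt sequence start_activity end_activity
instance (sequence : List Int) (start_activity : Int) (end_activity : Int) (out : List Int) : Decidable (Spec_filter_start_end_py sequence start_activity end_activity out) := by unfold Spec_filter_start_end_py; infer_instance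

-- ===== CLAIM (what is proved, stated in full; the proofs are below) =====
def Claim_equal_filter_start_end_py : Prop := ∀ (sequence : List Int) (start_activity : Int) (end_activity : Int), Dom_filter_start_end_py sequence start_activity end_activity → Spec_filter_start_end_py sequence start_activity end_activity (filter_start_end_py sequence start_activity end_activity)

-- ===== LEMMAS AND PROOFS =====

-- the two independent components of B's loop state
def pvStep1 (v : Int) (a : Option Int) (p : Int × Int) : Option Int :=
  if p.2 = v then some p.1 else a

def pvStep2 (v : Int) (b : Option Int) (p : Int × Int) : Option Int :=
  if p.2 = v ∧ b = none then some p.1 else b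

theorem pvStepB_eq (s e : Int) (acc : Option Int × Option Int) (p : Int × Int) :
    pvStepB s e acc p = (pvStep1 s acc.1 p, pvStep2 e acc.2 p) := by
  simp only [pvStepB, pvStep1, pvStep2]
  split_ifs <;> simp_all

theorem pv_foldl_pair (s e : Int) (L : List (Int × Int)) (a b : Option Int) :
    L.foldl (pvStepB s e) (a, b) = (L.foldl (pvStep1 s) a, L.foldl (pvStep2 e) b) := by
  induction L generalizing a b with
  | nil => rfl
  | cons p L ih => simp [List.foldl_cons, pvStepB_eq, ih]

theorem pv_fold2_some (v : Int) (L : List (Int × Int)) (k : Int) :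
    L.foldl (pvStep2 v) (some k) = some k := by
  induction L with
  | nil => rfl
  | cons p L ih => simp [List.foldl_cons, pvStep2, ih]

theorem pv_fold2 (v : Int) (xs : List Int) (s0 : Int) :
    (PySem.List.enumerate xs s0).foldl (pvStep2 v) none =
      (PySem.List.index? (xs.map (fun el => if el = v then true else false)) true).map
        (fun (i : Nat) => s0 + (i : Int)) := by
  induction xs generalizing s0 with
  | nil => rfl
  | cons x xs ih =>
    rw [PySem.List.enumerate_cons, List.foldl_cons]
    by_cases hx : x = v
    · have hh : (x :: xs).map (fun el => if el = v then true else false)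
          = true :: xs.map (fun el => if el = v then true else false) := by simp [hx]
      rw [hh, PySem.List.index?_cons_self]
      simp [pvStep2, hx, pv_fold2_some]
    · have h1 : (if x = v then true else false) ≠ true := by simp [hx]
      have hs : pvStep2 v none (s0, x) = none := by simp [pvStep2, hx]
      rw [List.map_cons, PySem.List.index?_cons_of_ne _ h1, hs, ih (s0 + 1)]
      cases PySem.List.index? (xs.map (fun el => if el = v then true else false)) true with
      | none => rfl
      | some i =>
        simp only [Option.map_some]
        congr 1
        push_cast
        ring

theorem pv_fold1 (v : Int) (xs : List Int) (s0 : Int) (a : Option Int) :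
    (PySem.List.enumerate xs s0).foldl (pvStep1 v) a =
      (match PySem.List.index? ((xs.map (fun el => if el = v then true else false)).reverse) true with
        | some i => some (s0 + (xs.length : Int) - 1 - (i : Int))
        | none => a) := by
  induction xs generalizing s0 a with
  | nil => rfl
  | cons x xs ih =>
    rw [PySem.List.enumerate_cons, List.foldl_cons, ih]
    have hrev : ((x :: xs).map (fun el => if el = v then true else false)).reverse
        = (xs.map (fun el => if el = v then true else false)).reverse ++ [if x = v then true else false] := by
      simp
    rw [hrev]
    by_cases hmem : true ∈ (xs.map (fun el => if el = v then true else false)).reverse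
    · rw [PySem.List.index?_append_of_mem _ hmem]
      rcases Option.isSome_iff_exists.mp ((PySem.List.index?_isSome_iff _ _).mpr hmem) with ⟨i, hi⟩
      rw [hi]
      simp only [List.length_cons]
      congr 1
      push_cast
      ring
    · have hnone : PySem.List.index? ((xs.map (fun el => if el = v then true else false)).reverse) true = none :=
        (PySem.List.index?_eq_none_iff _ _).mpr hmem
      rw [hnone]
      by_cases hx : x = v
      · have hcast : (if x = v then true else false) = true := by simp [hx]
        rw [hcast, PySem.List.index?_append_singleton_self _ _ hmem]
        simp only [pvStep1, hx, if_pos rfl, List.length_reverse, List.length_map,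
          List.length_cons]
        push_cast
        ring_nf
      · have hfalse : PySem.List.index?
            ((xs.map (fun el => if el = v then true else false)).reverse ++ [if x = v then true else false]) true = none := by
          rw [PySem.List.index?_eq_none_iff]
          simp only [List.mem_append, not_or]
          exact ⟨hmem, by simp [hx]⟩
        rw [hfalse]
        simp [pvStep1, hx]

-- the two ports' index bookkeeping agrees, case by case on the two searches
theorem pv_main (xs : List Int) (o1 o2 : Option Nat) :
    PySem.List.slice xs
        (some (match o1 with | some i => (xs.length : Int) - 1 - (i : Int) | none => 0))
        (some ((match o2 with | some i => (i : Int) | none => (xs.length : Int) - 1) + 1)) =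
      PySem.List.slice xs
        (some ((match o1 with
          | some i => some (0 + (xs.length : Int) - 1 - (i : Int))
          | none => none).getD 0))
        (some ((o2.map (fun (i : Nat) => 0 + (i : Int))).getD ((xs.length : Int) - 1) + 1)) := by
  cases o1 <;> cases o2 <;> simp

-- ===== VERDICT (by name: the statement is the Claim_ definition above) =====
theorem filter_start_end_py_spec : Claim_equal_filter_start_end_py := by
  intro xs s e _
  unfold Spec_filter_start_end_py filter_start_end_py filter_start_end_py_alt
  simp only [PySem.List.slice?_none_none_neg_one, Option.getD_some,
    pv_foldl_pair, pv_fold1, pv_fold2, List.map_reverse]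
  exact pv_main xs
    (PySem.List.index? ((xs.map (fun el => if el = s then true else false)).reverse) true)
    (PySem.List.index? (xs.map (fun el => if el = e then true else false)) true)
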